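-- pv_equiv track=rewrite | github.com/Koubae/Algorithm-Complete-Guide | Algorithms/src/Challanges/validate_subsequence/validate_subsequence.py | first_solution
-- ===== SOURCE A (Python) =====
-- def first_solution(array: list, sequence: list) -> bool:
--     """
--
--     """
--     same_values = []
--     for n in array:
--         if len(same_values) >= len(sequence):
--             break
--         if n in sequence:
--             same_values.append(n)
--
--     return same_values == sequence
-- ===== SOURCE B (Python) =====
-- def first_solution(array: list, sequence: list) -> bool:
--     members = set(sequence)
--     it = iter(array)
--     for expected in sequence:
--         for n in it:
--             if n in members:
--                 if n != expected:
--                     return False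
--                 break
--         else:
--             return False
--     return True
-- ===== Notes on version B (the rewrite author's own statement) =====
-- stated objective: faster
-- what changed: Drives the comparison from `sequence` instead of `array`: an outer loop over sequence consumes a shared iterator over array, matching each expected element against the next array element found in a precomputed hash set, with no intermediate list and early exit; A instead filters array (linear membership each step) into a list and compares lists at the end.
import Mathlib
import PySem

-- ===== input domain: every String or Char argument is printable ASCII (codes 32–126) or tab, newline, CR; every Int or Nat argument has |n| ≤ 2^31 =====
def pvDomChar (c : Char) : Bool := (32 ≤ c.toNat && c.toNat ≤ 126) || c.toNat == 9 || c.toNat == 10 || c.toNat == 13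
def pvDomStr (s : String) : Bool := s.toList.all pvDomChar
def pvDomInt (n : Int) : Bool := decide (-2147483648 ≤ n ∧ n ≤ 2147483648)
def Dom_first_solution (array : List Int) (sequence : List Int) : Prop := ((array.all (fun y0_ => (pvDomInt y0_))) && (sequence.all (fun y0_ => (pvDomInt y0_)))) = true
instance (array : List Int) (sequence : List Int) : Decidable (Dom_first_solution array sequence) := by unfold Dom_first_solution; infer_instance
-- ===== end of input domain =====

-- B drives the comparison from `sequence` (outer loop over sequence, consuming a shared
-- iterator over `array`) with membership via a precomputed set, instead of A's
-- filter-array-then-compare-lists; faster per the hash-set membership and early exit.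


-- ===== PORT A =====
-- A's loop: accumulate `same_values`, breaking once it is as long as `sequence`.
def fsLoopA (seq : List Int) (arr : List Int) (acc : List Int) : List Int :=
  match arr with
  | [] => acc
  | n :: rest =>
    if acc.length ≥ seq.length then acc
    else if n ∈ seq then fsLoopA seq rest (acc ++ [n])
    else fsLoopA seq rest acc

def first_solution (array : List Int) (sequence : List Int) : Bool :=
  decide (fsLoopA sequence array [] = sequence)

-- ===== PORT B =====
-- B's inner `for n in it: … break / else: return False` loop: advance the array iterator
-- to the next element of `members`; none = iterator exhausted or mismatch (both return False).
def fsInner (members : PySem.Set Int) (expected : Int) (it : List Int) : Option (List Int) :=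
  match it with
  | [] => none
  | n :: rest =>
    if n ∈ members then
      (if n ≠ expected then none else some rest)
    else fsInner members expected rest

-- B's outer `for expected in sequence` loop, threading the remaining iterator.
def fsOuter (members : PySem.Set Int) (seq : List Int) (it : List Int) : Bool :=
  match seq with
  | [] => true
  | e :: srest =>
    match fsInner members e it with
    | none => false
    | some it' => fsOuter members srest it'

def first_solution_alt (array : List Int) (sequence : List Int) : Bool :=
  fsOuter (PySem.Set.ofList sequence) sequence array

-- ===== PRECONDITION & SPEC =====
def Spec_first_solution (array : List Int) (sequence : List Int) (out : Bool) : Prop := out = first_solution_alt array sequence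
instance (array : List Int) (sequence : List Int) (out : Bool) : Decidable (Spec_first_solution array sequence out) := by unfold Spec_first_solution; infer_instance

-- ===== CLAIM (what is proved, stated in full; the proofs are below) =====
def Claim_equal_first_solution : Prop := ∀ (array : List Int) (sequence : List Int), Dom_first_solution array sequence → Spec_first_solution array sequence (first_solution array sequence)

-- ===== LEMMAS AND PROOFS =====

/-- A's loop only ever appends to its accumulator. -/
theorem fsLoopA_ext (seq : List Int) (arr : List Int) (acc : List Int) :
    ∃ t, fsLoopA seq arr acc = acc ++ t := by
  induction arr generalizing acc with
  | nil => exact ⟨[], by simp [fsLoopA]⟩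
  | cons n rest ih =>
    unfold fsLoopA
    split
    · exact ⟨[], by simp⟩
    · split
      · obtain ⟨t, ht⟩ := ih (acc ++ [n])
        exact ⟨n :: t, by simp [ht]⟩
      · exact ih acc

/-- Once the accumulator disagrees with `sequence` at index k, A's result ≠ `sequence`. -/
theorem fsLoopA_ne (seq : List Int) (arr : List Int) (acc : List Int) (k : Nat)
    (hk : k < acc.length) (hne : acc[k]? ≠ seq[k]?) :
    fsLoopA seq arr acc ≠ seq := by
  obtain ⟨t, ht⟩ := fsLoopA_ext seq arr acc
  rw [ht]
  intro h
  apply hne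
  rw [← h]
  rw [List.getElem?_append_left hk]

/-- B's outer loop ignores a leading non-member of the iterator. -/
theorem fsOuter_skip (members : PySem.Set Int) (sd : List Int) (n : Int) (rest : List Int)
    (h : n ∉ members) :
    fsOuter members sd (n :: rest) = fsOuter members sd rest := by
  cases sd with
  | nil => simp [fsOuter]
  | cons e s => simp [fsOuter, fsInner, h]

/-- Core invariant: A's loop with accumulator `seq.take k` agrees with B's outer loop on
    the remaining expectations `seq.drop k`, for any member-set equal to `seq` as a set. -/
theorem fsLoop_agree (seq : List Int) (members : PySem.Set Int)
    (hm : ∀ x, x ∈ members ↔ x ∈ seq)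
    (arr : List Int) (k : Nat) (hk : k ≤ seq.length) :
    decide (fsLoopA seq arr (seq.take k) = seq) = fsOuter members (seq.drop k) arr := by
  induction arr generalizing k with
  | nil =>
    simp only [fsLoopA]
    by_cases h : k = seq.length
    · subst h; simp [List.take_length, List.drop_length, fsOuter]
    · have hlen : (seq.take k).length = k := by simp [List.length_take]; omega
      have hne : seq.take k ≠ seq := by
        intro he
        exact h (by simpa [hlen] using congrArg List.length he)
      have hd : seq.drop k ≠ [] := by
        simp [List.drop_eq_nil_iff]; omega
      obtain ⟨e, s, hes⟩ := List.exists_cons_of_ne_nil hd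
      simp [hne, hes, fsOuter, fsInner]
  | cons n rest ih =>
    have hlen : (seq.take k).length = k := by simp [List.length_take]; omega
    unfold fsLoopA
    rw [hlen]
    by_cases hge : k ≥ seq.length
    · have hk' : k = seq.length := le_antisymm hk hge
      subst hk'
      simp [List.take_length, List.drop_length, fsOuter]
    · simp only [if_neg hge]
      have hklt : k < seq.length := lt_of_not_ge hge
      have hdrop : seq.drop k = seq[k] :: seq.drop (k + 1) :=
        List.drop_eq_getElem_cons hklt
      by_cases hmem : n ∈ seq
      · have hc : n ∈ members := (hm n).mpr hmem
        simp only [if_pos hmem]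
        by_cases heq : n = seq[k]
        · have happ : seq.take k ++ [n] = seq.take (k + 1) := by
            rw [List.take_add_one, List.getElem?_eq_getElem hklt]
            simp [heq]
          rw [happ, hdrop]
          simp only [fsOuter, fsInner]
          rw [if_pos hc, if_neg (by simp [heq])]
          exact ih (k + 1) (by omega)
        · have hne : fsLoopA seq rest (seq.take k ++ [n]) ≠ seq := by
            apply fsLoopA_ne seq rest _ k
            · simp [hlen]
            · have h1 : (seq.take k ++ [n])[k]? = some n := by
                rw [List.getElem?_append_right (by omega)]
                simp [hlen]
              have h2 : seq[k]? = some seq[k] := List.getElem?_eq_getElem hklt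
              rw [h1, h2]
              intro hc'
              exact heq (by injection hc')
          rw [hdrop]
          simp only [fsOuter, fsInner]
          rw [if_pos hc, if_pos (by simp [heq])]
          simp [hne]
      · have hc : n ∉ members := fun h => hmem ((hm n).mp h)
        simp only [if_neg hmem]
        rw [fsOuter_skip members _ n rest hc]
        exact ih k hk

-- ===== VERDICT (by name: the statement is the Claim_ definition above) =====
theorem first_solution_spec : Claim_equal_first_solution := by
  intro array sequence _
  unfold Spec_first_solution first_solution first_solution_alt
  have hm : ∀ x, x ∈ PySem.Set.ofList sequence ↔ x ∈ sequence := fun x =>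
    PySem.Set.mem_ofList sequence x
  have := fsLoop_agree sequence (PySem.Set.ofList sequence) hm array 0 (Nat.zero_le _)
  simpa using this
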